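-- pv_equiv track=rewrite | github.com/pedroinc/hackerhank | grading.py | solve
-- ===== SOURCE A (Python) =====
-- def solve(grades):
--
--     new_grades = []
--
--     for g in grades:
--         counter = 1
--         g_increased = False
--         while counter < 3:
--             if (g + counter) % 5 == 0 and g + counter >= 40:
--                 new_grades.append(g + counter)
--                 g_increased = True
--                 break
--
--             counter += 1
--
--         if not g_increased:
--             new_grades.append(g)
--
--     return new_grades
-- ===== SOURCE B (Python) =====
-- def solve(grades):
--     new_grades = []
--     for g in grades:
--         r = g % 5
--         if r >= 3 and g + (5 - r) >= 40:
--             new_grades.append(g + (5 - r))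
--         else:
--             new_grades.append(g)
--     return new_grades
-- ===== Notes on version B (the rewrite author's own statement) =====
-- stated objective: simpler
-- what changed: Replaces the inner while-loop that probes g+1 and g+2 for the next multiple of 5 with a single closed-form arithmetic branch per grade: r = g % 5, round to g + (5 - r) exactly when r >= 3 and g + (5 - r) >= 40.
import Mathlib
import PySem

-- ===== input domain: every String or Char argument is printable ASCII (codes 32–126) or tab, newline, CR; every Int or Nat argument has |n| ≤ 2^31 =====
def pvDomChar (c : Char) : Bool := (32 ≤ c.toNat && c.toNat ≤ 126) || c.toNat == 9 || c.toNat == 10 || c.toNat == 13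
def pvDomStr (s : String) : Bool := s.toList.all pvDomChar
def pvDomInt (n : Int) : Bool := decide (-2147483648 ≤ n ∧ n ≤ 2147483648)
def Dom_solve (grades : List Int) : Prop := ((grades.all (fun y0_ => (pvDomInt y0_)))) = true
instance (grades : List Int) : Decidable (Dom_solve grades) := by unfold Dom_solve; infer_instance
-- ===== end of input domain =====

-- B replaces A's inner while-loop probe (counter = 1, 2) with a closed-form rounding branch per grade; objective: simpler.
-- ===== PORT A =====
-- the while loop 'while counter < 3: …', returning the appended value if the break fires
def solveWhile (g : Int) (counter : Int) : Option Int :=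
  if _h : counter < 3 then
    if PySem.Int.mod (g + counter) 5 = 0 ∧ g + counter ≥ 40 then
      some (g + counter)
    else
      solveWhile g (counter + 1)
  else
    none
termination_by (3 - counter).toNat
decreasing_by omega

def solve (grades : List Int) : List Int :=
  grades.foldl (fun new_grades g =>
    match solveWhile g 1 with
    | some v => new_grades ++ [v]      -- appended inside the loop, g_increased = True
    | none => new_grades ++ [g]) []    -- if not g_increased

-- ===== PORT B =====
def solve_alt (grades : List Int) : List Int :=
  grades.foldl (fun new_grades g =>
    let r := PySem.Int.mod g 5
    if r ≥ 3 ∧ g + (5 - r) ≥ 40 then new_grades ++ [g + (5 - r)]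
    else new_grades ++ [g]) []

-- ===== PRECONDITION & SPEC =====
def Spec_solve (grades : List Int) (out : List Int) : Prop := out = solve_alt grades
instance (grades : List Int) (out : List Int) : Decidable (Spec_solve grades out) := by unfold Spec_solve; infer_instance

-- ===== CLAIM (what is proved, stated in full; the proofs are below) =====
def Claim_equal_solve : Prop := ∀ (grades : List Int), Dom_solve grades → Spec_solve grades (solve grades)

-- ===== LEMMAS AND PROOFS =====

-- ===== VERDICT (by name: the statement is the Claim_ definition above) =====
lemma elem_eq (g : Int) :
    (match solveWhile g 1 with
     | some v => [v]
     | none => [g]) =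
    (let r := PySem.Int.mod g 5
     if r ≥ 3 ∧ g + (5 - r) ≥ 40 then [g + (5 - r)] else [g]) := by
  have h1 : PySem.Int.mod (g + 1) 5 = (g + 1) % 5 := PySem.Int.mod_eq_emod_of_pos (by norm_num)
  have h2 : PySem.Int.mod (g + 2) 5 = (g + 2) % 5 := PySem.Int.mod_eq_emod_of_pos (by norm_num)
  have h0 : PySem.Int.mod g 5 = g % 5 := PySem.Int.mod_eq_emod_of_pos (by norm_num)
  unfold solveWhile
  unfold solveWhile
  unfold solveWhile
  simp only [h0, h1]
  split_ifs <;> simp_all <;> omega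

lemma foldl_eq (grades : List Int) (acc : List Int) :
    grades.foldl (fun new_grades g =>
      match solveWhile g 1 with
      | some v => new_grades ++ [v]
      | none => new_grades ++ [g]) acc =
    grades.foldl (fun new_grades g =>
      let r := PySem.Int.mod g 5
      if r ≥ 3 ∧ g + (5 - r) ≥ 40 then new_grades ++ [g + (5 - r)]
      else new_grades ++ [g]) acc := by
  induction grades generalizing acc with
  | nil => rfl
  | cons g gs ih =>
    simp only [List.foldl]
    rw [ih]
    congr 1
    have := elem_eq g
    simp only [] at this
    split at this <;> split_ifs at this ⊢ <;> simp_all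

theorem solve_spec : Claim_equal_solve := by
  intro grades _
  unfold Spec_solve solve solve_alt
  exact foldl_eq grades []
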